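-- pv_equiv track=rewrite | github.com/jesperenglund92/AyTdImagenes | ImagenesMain.py | calculate_derivative
-- ===== SOURCE A (Python) =====
-- def apply_threshold(num1, num2, threshold):
--     a = abs(num1)
--     b = abs(num2)
--     if (a + b) > threshold:
--         return 255
--     return 0
--
-- def calculate_derivative(matrix, width, height, side, threshold):
--     new_matrix = []
--     if side == "horizontal":
--         for y in range(height):
--             row = []
--             for x in range(width):
--                 pixel_color = []
--                 for z in range(3):
--                     if x == width - 1:
--                         pixel_color.append(0)
--                     elif matrix[y][x][z] * matrix[y][x + 1][z] < 0:
--                         pixel_color.append(apply_threshold(matrix[y][x][z], matrix[y][x + 1][z], threshold))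
--                     elif x < width - 2:
--                         if matrix[y][x][z] * matrix[y][x + 2][z] < 0 and matrix[y][x + 1][z] == 0:
--                             pixel_color.append(apply_threshold(matrix[y][x][z], matrix[y][x + 2][z], threshold))
--                         else:
--                             pixel_color.append(0)
--                     else:
--                         pixel_color.append(0)
--                 row.append(pixel_color)
--             new_matrix.append(row)
--     else:
--         for x in range(width):
--             row = []
--             for y in range(height):
--                 pixel_color = []
--                 for z in range(3):
--                     if y == height - 1:
--                         pixel_color.append(0)
--                     elif matrix[y][x][z] * matrix[y + 1][x][z] < 0:
--                         pixel_color.append(apply_threshold(matrix[y][x][z], matrix[y + 1][x][z], threshold))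
--                     elif y < height - 2:
--                         if matrix[y][x][z] * matrix[y + 2][x][z] < 0 and matrix[y + 1][x][z] == 0:
--                             pixel_color.append(apply_threshold(matrix[y][x][z], matrix[y + 2][x][z], threshold))
--                         else:
--                             pixel_color.append(0)
--                     else:
--                         pixel_color.append(0)
--                 row.append(pixel_color)
--             new_matrix.append(row)
--     return new_matrix
-- ===== SOURCE B (Python) =====
-- def _channel3(a, b, c, threshold):
--     if a * b < 0:
--         return 255 if abs(a) + abs(b) > threshold else 0
--     if a * c < 0 and b == 0:
--         return 255 if abs(a) + abs(c) > threshold else 0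
--     return 0
--
--
-- def _channel2(a, b, threshold):
--     if a * b < 0:
--         return 255 if abs(a) + abs(b) > threshold else 0
--     return 0
--
--
-- def _line_derivative(line, threshold):
--     out = [[_channel3(p[z], q[z], r[z], threshold) for z in range(3)]
--            for p, q, r in zip(line, line[1:], line[2:])]
--     if len(line) >= 2:
--         p, q = line[-2], line[-1]
--         out.append([_channel2(p[z], q[z], threshold) for z in range(3)])
--     if len(line) >= 1:
--         out.append([0, 0, 0])
--     return out
--
--
-- def calculate_derivative(matrix, width, height, side, threshold):
--     w = max(width, 0)
--     h = max(height, 0)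
--     if side == "horizontal":
--         return [_line_derivative(matrix[y][:w], threshold) for y in range(h)]
--     return [_line_derivative([row[x] for row in matrix[:h]], threshold)
--             for x in range(w)]
-- ===== Notes on version B (the rewrite author's own statement) =====
-- stated objective: simpler
-- what changed: A's two duplicated quadruply-nested index-arithmetic loops become one shared 1-D pass: a helper zips a pixel line with its two shifted tails and appends the two boundary pixels, applied to each row (horizontal) or to each materialized column (vertical).
-- outside the precondition, e.g. on calculate_derivative([], 1, 1, 'horizontal', 0): A returns [[[0, 0, 0]]], B raises IndexError; on calculate_derivative([], 1, 1, 'vertical', 0): A returns [[[0, 0, 0]]], B returns [[]]; on calculate_derivative([[]], 1, 1, 'horizontal', 0): A returns [[[0, 0, 0]]], B returns [[]]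
import Mathlib
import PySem

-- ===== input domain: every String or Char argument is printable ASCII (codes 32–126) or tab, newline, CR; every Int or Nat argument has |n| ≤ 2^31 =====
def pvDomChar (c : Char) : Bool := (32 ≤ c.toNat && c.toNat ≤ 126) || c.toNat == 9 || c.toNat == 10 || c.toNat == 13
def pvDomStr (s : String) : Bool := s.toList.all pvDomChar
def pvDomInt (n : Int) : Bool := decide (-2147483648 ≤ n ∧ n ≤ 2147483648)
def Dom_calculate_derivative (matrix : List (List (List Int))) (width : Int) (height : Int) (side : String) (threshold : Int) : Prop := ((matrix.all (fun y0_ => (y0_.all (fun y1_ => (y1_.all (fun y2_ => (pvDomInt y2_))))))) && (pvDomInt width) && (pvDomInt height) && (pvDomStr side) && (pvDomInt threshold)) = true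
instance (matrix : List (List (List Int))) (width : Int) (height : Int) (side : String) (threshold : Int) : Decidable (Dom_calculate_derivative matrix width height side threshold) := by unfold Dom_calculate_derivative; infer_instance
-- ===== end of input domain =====

-- B replaces A's two duplicated quadruply-nested index loops by one shared 1-D pass
-- (zip of a pixel line with its two shifted tails) applied to every row, or to every
-- materialized column — objective: simpler (return-value equivalence; no mutation).

-- ===== PORT A =====
def apply_threshold (num1 num2 threshold : Int) : Int :=
  if |num1| + |num2| > threshold then 255 else 0

-- A's innermost z-branch (the body of `for z in range(3)`), over an abstract 1-D
-- accessor `get` (get i = the pixel at scan position i along the row/column): A's two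
-- branches are this same code with the accessor and extent swapped.
def pvChanA (get : Int → List Int) (n x z threshold : Int) : Int :=
  if x = n - 1 then 0
  else if PySem.List.pyGetD (get x) z 0 * PySem.List.pyGetD (get (x + 1)) z 0 < 0 then
    apply_threshold (PySem.List.pyGetD (get x) z 0) (PySem.List.pyGetD (get (x + 1)) z 0) threshold
  else if x < n - 2 then
    (if PySem.List.pyGetD (get x) z 0 * PySem.List.pyGetD (get (x + 2)) z 0 < 0 ∧
        PySem.List.pyGetD (get (x + 1)) z 0 = 0 then
      apply_threshold (PySem.List.pyGetD (get x) z 0) (PySem.List.pyGetD (get (x + 2)) z 0) threshold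
    else 0)
  else 0

-- A's `pixel_color` loop: for z in range(3): pixel_color.append(<branch>)
def pvPixA (get : Int → List Int) (n x threshold : Int) : List Int :=
  (PySem.List.pyRange 0 3 1).foldl
    (fun pixel_color z => pixel_color ++ [pvChanA get n x z threshold]) []

def calculate_derivative (matrix : List (List (List Int))) (width : Int) (height : Int) (side : String) (threshold : Int) : List (List (List Int)) :=
  if side == "horizontal" then
    (PySem.List.pyRange 0 height 1).foldl (fun new_matrix y =>
      new_matrix ++ [(PySem.List.pyRange 0 width 1).foldl (fun row x =>
        row ++ [pvPixA (fun i => PySem.List.pyGetD (PySem.List.pyGetD matrix y []) i []) width x threshold]) []]) []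
  else
    (PySem.List.pyRange 0 width 1).foldl (fun new_matrix x =>
      new_matrix ++ [(PySem.List.pyRange 0 height 1).foldl (fun row y =>
        row ++ [pvPixA (fun i => PySem.List.pyGetD (PySem.List.pyGetD matrix i []) x []) height y threshold]) []]) []

-- ===== PORT B =====
def pvChan3 (a b c threshold : Int) : Int :=
  if a * b < 0 then (if |a| + |b| > threshold then 255 else 0)
  else if a * c < 0 ∧ b = 0 then (if |a| + |c| > threshold then 255 else 0)
  else 0

def pvChan2 (a b threshold : Int) : Int :=
  if a * b < 0 then (if |a| + |b| > threshold then 255 else 0) else 0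

def pvLineDeriv (line : List (List Int)) (threshold : Int) : List (List Int) :=
  let mid := ((line.zip (line.drop 1)).zip (line.drop 2)).map (fun pr =>
    (PySem.List.pyRange 0 3 1).map (fun z =>
      pvChan3 (PySem.List.pyGetD pr.1.1 z 0) (PySem.List.pyGetD pr.1.2 z 0)
        (PySem.List.pyGetD pr.2 z 0) threshold))
  let out := if 2 ≤ line.length then
      mid ++ [(PySem.List.pyRange 0 3 1).map (fun z =>
        pvChan2 (PySem.List.pyGetD (PySem.List.pyGetD line (-2) []) z 0)
          (PySem.List.pyGetD (PySem.List.pyGetD line (-1) []) z 0) threshold)]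
    else mid
  if 1 ≤ line.length then out ++ [[0, 0, 0]] else out

def calculate_derivative_alt (matrix : List (List (List Int))) (width : Int) (height : Int) (side : String) (threshold : Int) : List (List (List Int)) :=
  let w := max width 0
  let h := max height 0
  if side == "horizontal" then
    (PySem.List.pyRange 0 h 1).map (fun y =>
      pvLineDeriv (PySem.List.slice (PySem.List.pyGetD matrix y []) none (some w)) threshold)
  else
    (PySem.List.pyRange 0 w 1).map (fun x =>
      pvLineDeriv ((PySem.List.slice matrix none (some h)).map
        (fun row => PySem.List.pyGetD row x [])) threshold)

-- ===== PRECONDITION & SPEC =====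
-- Pre_ excludes inputs whose declared height/width exceed the matrix's actual extents:
-- there A's chained subscripts either raise IndexError, or (for degenerate width/height 1,
-- where A emits zero pixels without ever reading the matrix) B's row/column
-- materialization reads the missing data and raises or returns a shorter layout.
def Pre_calculate_derivative (matrix : List (List (List Int))) (width : Int) (height : Int) (side : String) (threshold : Int) : Prop :=
  if side == "horizontal" then
    height ≤ 0 ∨ (height.toNat ≤ matrix.length ∧ ∀ row ∈ matrix.take height.toNat,
      width.toNat ≤ row.length ∧ (width ≤ 1 ∨ ∀ p ∈ row.take width.toNat, 3 ≤ p.length))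
  else
    width ≤ 0 ∨ height ≤ 0 ∨ (height.toNat ≤ matrix.length ∧ ∀ row ∈ matrix.take height.toNat,
      width.toNat ≤ row.length ∧ (height = 1 ∨ ∀ p ∈ row.take width.toNat, 3 ≤ p.length))
instance (matrix : List (List (List Int))) (width : Int) (height : Int) (side : String) (threshold : Int) : Decidable (Pre_calculate_derivative matrix width height side threshold) := by unfold Pre_calculate_derivative; infer_instance

def pvWitness_calculate_derivative : List (List (List Int)) × Int × Int × String × Int :=
  ([[[1, -1, 0], [-2, 3, 0]], [[0, 1, 2], [5, -5, 1]]], 2, 2, "horizontal", 1)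

def Spec_calculate_derivative (matrix : List (List (List Int))) (width : Int) (height : Int) (side : String) (threshold : Int) (out : List (List (List Int))) : Prop := out = calculate_derivative_alt matrix width height side threshold
instance (matrix : List (List (List Int))) (width : Int) (height : Int) (side : String) (threshold : Int) (out : List (List (List Int))) : Decidable (Spec_calculate_derivative matrix width height side threshold out) := by unfold Spec_calculate_derivative; infer_instance

-- ===== CLAIM (what is proved, stated in full; the proofs are below) =====
def Claim_equal_calculate_derivative : Prop := ∀ (matrix : List (List (List Int))) (width : Int) (height : Int) (side : String) (threshold : Int), Dom_calculate_derivative matrix width height side threshold → Pre_calculate_derivative matrix width height side threshold → Spec_calculate_derivative matrix width height side threshold (calculate_derivative matrix width height side threshold)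

-- ===== LEMMAS AND PROOFS =====

theorem pvWitness_ok : Dom_calculate_derivative (pvWitness_calculate_derivative.1) (pvWitness_calculate_derivative.2.1) (pvWitness_calculate_derivative.2.2.1) (pvWitness_calculate_derivative.2.2.2.1) (pvWitness_calculate_derivative.2.2.2.2) ∧ Pre_calculate_derivative (pvWitness_calculate_derivative.1) (pvWitness_calculate_derivative.2.1) (pvWitness_calculate_derivative.2.2.1) (pvWitness_calculate_derivative.2.2.2.1) (pvWitness_calculate_derivative.2.2.2.2) := by
  decide

theorem take_eq_map_range {α : Type} (d : α) (l : List α) (n : Nat) (h : n ≤ l.length) :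
    l.take n = (List.range n).map (fun i => l.getD i d) := by
  apply List.ext_getElem
  · simp [Nat.min_eq_left h]
  · intro i h1 h2
    simp only [List.getElem_take, List.getElem_map, List.getElem_range]
    rw [List.getD_eq_getElem l d (by simp at h1; omega)]

theorem pyRange_max0 (a : Int) : PySem.List.pyRange 0 (max a 0) 1 = PySem.List.pyRange 0 a 1 := by
  by_cases h : a ≤ 0
  · rw [PySem.List.pyRange_one_eq_nil (by omega), PySem.List.pyRange_one_eq_nil (by omega)]
  · rw [max_eq_left (by omega)]

theorem pyGetD_neg2_cons {α : Type} (x : α) (l : List α) (d : α) (hk : 2 ≤ l.length) :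
    PySem.List.pyGetD (x :: l) (-2) d = PySem.List.pyGetD l (-2) d := by
  rw [PySem.List.pyGetD_neg_ofNat (x :: l) 2 d (by omega) (by simp; omega),
      PySem.List.pyGetD_neg_ofNat l 2 d (by omega) hk]
  rw [List.getElem_cons, dif_neg (by simp; omega)]
  simp [show l.length - 1 - 1 = l.length - 2 from by omega]

theorem pyGetD_neg1_cons {α : Type} (x : α) (l : List α) (d : α) (hk : 1 ≤ l.length) :
    PySem.List.pyGetD (x :: l) (-1) d = PySem.List.pyGetD l (-1) d := by
  have hl : l ≠ [] := by intro h; subst h; simp at hk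
  rw [PySem.List.pyGetD_neg_one (x :: l) d (by simp), PySem.List.pyGetD_neg_one l d hl]
  exact List.getLast_cons hl

theorem pvPixA_eq (get : Int → List Int) (n x t : Int) :
    pvPixA get n x t = [pvChanA get n x 0 t, pvChanA get n x 1 t, pvChanA get n x 2 t] := by
  have h3 : PySem.List.pyRange 0 3 1 = [0, 1, 2] := by decide
  simp [pvPixA, h3]

theorem map_pyRange3 (f : Int → Int) : (PySem.List.pyRange 0 3 1).map f = [f 0, f 1, f 2] := by
  have h3 : PySem.List.pyRange 0 3 1 = [0, 1, 2] := by decide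
  simp [h3]

theorem pvChanA_last (get : Int → List Int) (n x z t : Int) (h : x = n - 1) :
    pvChanA get n x z t = 0 := by simp [pvChanA, h]

theorem pvChanA_pair (get : Int → List Int) (n x z t : Int) (h1 : x ≠ n - 1) (h2 : ¬ x < n - 2) :
    pvChanA get n x z t = pvChan2 (PySem.List.pyGetD (get x) z 0) (PySem.List.pyGetD (get (x + 1)) z 0) t := by
  simp [pvChanA, pvChan2, apply_threshold, h1, h2]

theorem pvChanA_mid (get : Int → List Int) (n x z t : Int) (h1 : x ≠ n - 1) (h2 : x < n - 2) :
    pvChanA get n x z t = pvChan3 (PySem.List.pyGetD (get x) z 0) (PySem.List.pyGetD (get (x + 1)) z 0)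
      (PySem.List.pyGetD (get (x + 2)) z 0) t := by
  simp [pvChanA, pvChan3, apply_threshold, h1, h2]

theorem pvChanA_shift (get : Int → List Int) (n x z t : Int) :
    pvChanA get n (x + 1) z t = pvChanA (fun j => get (j + 1)) (n - 1) x z t := by
  have e : x + 2 + 1 = x + 1 + 2 := by ring
  have h1 : (x + 1 = n - 1) ↔ (x = n - 1 - 1) := by omega
  have h2 : (x + 1 < n - 2) ↔ (x < n - 1 - 2) := by omega
  simp only [pvChanA, e, h1, h2]

theorem pvPixA_shift (get : Int → List Int) (n x t : Int) :
    pvPixA get n (x + 1) t = pvPixA (fun j => get (j + 1)) (n - 1) x t := by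
  simp [pvPixA_eq, pvChanA_shift]

theorem pvLineDeriv_nil (t : Int) : pvLineDeriv [] t = [] := by simp [pvLineDeriv]

theorem pvLineDeriv_single (t : Int) (p : List Int) : pvLineDeriv [p] t = [[0, 0, 0]] := by
  simp [pvLineDeriv]

theorem pvLineDeriv_pair (t : Int) (p q : List Int) :
    pvLineDeriv [p, q] t =
      [(PySem.List.pyRange 0 3 1).map (fun z =>
        pvChan2 (PySem.List.pyGetD p z 0) (PySem.List.pyGetD q z 0) t), [0, 0, 0]] := by
  have e2 : PySem.List.pyGetD [p, q] (-2) ([] : List Int) = p := by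
    rw [PySem.List.pyGetD_neg_ofNat [p, q] 2 _ (by omega) (by simp)]; simp
  have e1 : PySem.List.pyGetD [p, q] (-1) ([] : List Int) = q := by
    rw [PySem.List.pyGetD_neg_one _ _ (by simp)]; simp
  simp [pvLineDeriv, e2, e1]

theorem pvLineDeriv_cons (t : Int) (p : List Int) (l : List (List Int)) (h : 2 ≤ l.length) :
    pvLineDeriv (p :: l) t =
      ((PySem.List.pyRange 0 3 1).map (fun z =>
        pvChan3 (PySem.List.pyGetD p z 0) (PySem.List.pyGetD (l.getD 0 []) z 0)
          (PySem.List.pyGetD (l.getD 1 []) z 0) t)) :: pvLineDeriv l t := by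
  rcases l with _ | ⟨q, l2⟩
  · simp at h
  rcases l2 with _ | ⟨r, rest⟩
  · simp at h
  simp only [pvLineDeriv,
    pyGetD_neg2_cons p (q :: r :: rest) ([] : List Int) (by simp),
    pyGetD_neg1_cons p (q :: r :: rest) ([] : List Int) (by simp)]
  simp

theorem pvKey (t : Int) : ∀ (n : Nat) (get : Int → List Int),
    (List.range n).map (fun k : Nat => pvPixA get (n : Int) ((k : Nat) : Int) t)
      = pvLineDeriv ((List.range n).map (fun k : Nat => get ((k : Nat) : Int))) t := by
  intro n
  induction n with
  | zero => intro get; simp [pvLineDeriv_nil]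
  | succ m ih =>
    intro get
    match m, ih with
    | 0, _ =>
      simp [pvLineDeriv_single, pvPixA_eq, pvChanA_last]
    | 1, _ =>
      have hr : List.range 2 = [0, 1] := by decide
      simp only [hr, List.map_cons, List.map_nil, Nat.cast_zero, Nat.cast_one]
      rw [pvLineDeriv_pair, pvPixA_eq, pvPixA_eq, map_pyRange3]
      push_cast
      rw [pvChanA_pair get 2 0 0 t (by omega) (by omega),
          pvChanA_pair get 2 0 1 t (by omega) (by omega),
          pvChanA_pair get 2 0 2 t (by omega) (by omega),
          pvChanA_last get 2 1 0 t (by omega), pvChanA_last get 2 1 1 t (by omega),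
          pvChanA_last get 2 1 2 t (by omega)]
      norm_num
    | (w+2), ih =>
      have hshift : ∀ k : Nat, pvPixA get ((w+2+1 : Nat) : Int) ((k+1 : Nat) : Int) t
          = pvPixA (fun j => get (j + 1)) ((w+2 : Nat) : Int) ((k : Nat) : Int) t := by
        intro k
        rw [show ((k+1 : Nat) : Int) = ((k : Nat) : Int) + 1 by push_cast; ring,
            pvPixA_shift, show ((w+2+1 : Nat) : Int) - 1 = ((w+2 : Nat) : Int) by push_cast; ring]
      rw [List.range_succ_eq_map]
      simp only [List.map_cons, List.map_map]
      have hL : (List.range (w+2)).map ((fun k : Nat => get ((k : Nat) : Int)) ∘ Nat.succ)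
          = (List.range (w+2)).map (fun k : Nat => (fun j => get (j + 1)) ((k : Nat) : Int)) := by
        apply List.map_congr_left
        intro k _
        simp only [Function.comp]
        rw [show ((Nat.succ k : Nat) : Int) = ((k : Nat) : Int) + 1 by push_cast; ring]
      rw [hL]
      have hlen : 2 ≤ ((List.range (w+2)).map (fun k : Nat => (fun j => get (j + 1)) ((k : Nat) : Int))).length := by
        simp
      rw [pvLineDeriv_cons t _ _ hlen]
      congr 1
      · rw [pvPixA_eq, map_pyRange3]
        have hg0 : ((List.range (w+2)).map (fun k : Nat => (fun j => get (j + 1)) ((k : Nat) : Int))).getD 0 [] = get 1 := by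
          rw [List.getD_eq_getElem _ _ (by simp)]
          simp
        have hg1 : ((List.range (w+2)).map (fun k : Nat => (fun j => get (j + 1)) ((k : Nat) : Int))).getD 1 [] = get 2 := by
          rw [List.getD_eq_getElem _ _ (by simp)]
          simp
        rw [hg0, hg1]
        simp only [Nat.cast_zero]
        rw [pvChanA_mid get _ 0 0 t (by push_cast; omega) (by push_cast; omega),
            pvChanA_mid get _ 0 1 t (by push_cast; omega) (by push_cast; omega),
            pvChanA_mid get _ 0 2 t (by push_cast; omega) (by push_cast; omega)]
        norm_num
      · have := ih (fun j => get (j + 1))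
        calc (List.range (w+2)).map ((fun k : Nat => pvPixA get ((w+2+1 : Nat) : Int) ((k : Nat) : Int) t) ∘ Nat.succ)
            = (List.range (w+2)).map (fun k : Nat => pvPixA (fun j => get (j + 1)) ((w+2 : Nat) : Int) ((k : Nat) : Int) t) := by
              apply List.map_congr_left
              intro k _
              simp only [Function.comp]
              exact hshift k
          _ = pvLineDeriv ((List.range (w+2)).map (fun k : Nat => (fun j => get (j + 1)) ((k : Nat) : Int))) t := this

theorem pvRowH (row : List (List Int)) (width t : Int) (hw : width.toNat ≤ row.length) :
    (PySem.List.pyRange 0 width 1).foldl (fun acc x =>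
        acc ++ [pvPixA (fun i => PySem.List.pyGetD row i []) width x t]) []
      = pvLineDeriv (PySem.List.slice row none (some (max width 0))) t := by
  by_cases hneg : width ≤ 0
  · rw [PySem.List.pyRange_one_eq_nil (by omega), show max width 0 = 0 from by omega,
        PySem.List.slice_to _ (le_refl 0)]
    simp [pvLineDeriv_nil]
  · have hw0 : (0 : Int) ≤ width := by omega
    rw [show max width 0 = width from by omega,
        PySem.List.foldl_append_singleton_eq_map, List.nil_append,
        PySem.List.pyRange_one, List.map_map,
        show ((width - 0).toNat) = width.toNat from by omega,
        PySem.List.slice_to _ hw0,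
        take_eq_map_range ([] : List Int) row width.toNat hw]
    have h1 : ((fun x => pvPixA (fun i => PySem.List.pyGetD row i []) width x t) ∘ (fun k : Nat => (0 : Int) + ↑k))
        = fun k : Nat => pvPixA (fun i => PySem.List.pyGetD row i []) ((width.toNat : Nat) : Int) ((k : Nat) : Int) t := by
      funext k
      simp only [Function.comp]
      rw [zero_add, Int.toNat_of_nonneg hw0]
    rw [h1, pvKey t width.toNat (fun i => PySem.List.pyGetD row i [])]
    congr 1
    apply List.map_congr_left
    intro k _
    simp

theorem pvColV (matrix : List (List (List Int))) (height t x : Int) (hh : height.toNat ≤ matrix.length) :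
    (PySem.List.pyRange 0 height 1).foldl (fun acc y =>
        acc ++ [pvPixA (fun i => PySem.List.pyGetD (PySem.List.pyGetD matrix i []) x []) height y t]) []
      = pvLineDeriv ((PySem.List.slice matrix none (some (max height 0))).map
          (fun row => PySem.List.pyGetD row x [])) t := by
  by_cases hneg : height ≤ 0
  · rw [PySem.List.pyRange_one_eq_nil (by omega), show max height 0 = 0 from by omega,
        PySem.List.slice_to _ (le_refl 0)]
    simp [pvLineDeriv_nil]
  · have hh0 : (0 : Int) ≤ height := by omega
    rw [show max height 0 = height from by omega,
        PySem.List.foldl_append_singleton_eq_map, List.nil_append,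
        PySem.List.pyRange_one, List.map_map,
        show ((height - 0).toNat) = height.toNat from by omega,
        PySem.List.slice_to _ hh0,
        take_eq_map_range ([] : List (List Int)) matrix height.toNat hh, List.map_map]
    have h1 : ((fun y => pvPixA (fun i => PySem.List.pyGetD (PySem.List.pyGetD matrix i []) x []) height y t) ∘ (fun k : Nat => (0 : Int) + ↑k))
        = fun k : Nat => pvPixA (fun i => PySem.List.pyGetD (PySem.List.pyGetD matrix i []) x []) ((height.toNat : Nat) : Int) ((k : Nat) : Int) t := by
      funext k
      simp only [Function.comp]
      rw [zero_add, Int.toNat_of_nonneg hh0]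
    rw [h1, pvKey t height.toNat (fun i => PySem.List.pyGetD (PySem.List.pyGetD matrix i []) x [])]
    congr 1
    apply List.map_congr_left
    intro k _
    simp

-- ===== VERDICT (by name: the statement is the Claim_ definition above) =====
theorem calculate_derivative_spec : Claim_equal_calculate_derivative := by
  unfold Claim_equal_calculate_derivative
  intro matrix width height side threshold _ hPre
  unfold Spec_calculate_derivative calculate_derivative calculate_derivative_alt
  unfold Pre_calculate_derivative at hPre
  by_cases hs : side == "horizontal"
  · simp only [hs, if_true] at hPre ⊢
    rw [pyRange_max0, PySem.List.foldl_append_singleton_eq_map, List.nil_append]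
    apply List.map_congr_left
    intro y hy
    rw [PySem.List.mem_pyRange_one] at hy
    rcases hPre with hneg | ⟨hh, hrows⟩
    · omega
    · have hy0 : (0 : Int) ≤ y := hy.1
      have hyn : y.toNat < height.toNat := by omega
      have hrow : PySem.List.pyGetD matrix y [] = matrix.getD y.toNat [] := by
        rw [PySem.List.pyGetD_eq_getElem matrix [] hy0 (by omega),
            List.getD_eq_getElem _ _ (by omega)]
      have hlt : y.toNat < (matrix.take height.toNat).length := by
        simp
        omega
      have hmem : matrix.getD y.toNat [] ∈ matrix.take height.toNat := by
        have he : (matrix.take height.toNat)[y.toNat] = matrix.getD y.toNat [] := by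
          rw [List.getElem_take]
          rw [List.getD_eq_getElem _ _ (by omega)]
        exact he ▸ List.getElem_mem hlt
      rw [hrow]
      exact pvRowH (matrix.getD y.toNat []) width threshold (hrows _ hmem).1
  · simp only [hs, if_false, Bool.false_eq_true] at hPre ⊢
    rw [pyRange_max0, PySem.List.foldl_append_singleton_eq_map, List.nil_append]
    apply List.map_congr_left
    intro x hx
    rw [PySem.List.mem_pyRange_one] at hx
    rcases hPre with hw | hh | ⟨hhm, _⟩
    · omega
    · rw [PySem.List.pyRange_one_eq_nil (by omega), show max height 0 = 0 from by omega,
          PySem.List.slice_to _ (le_refl 0)]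
      simp [pvLineDeriv_nil]
    · exact pvColV matrix height threshold x hhm
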